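-- pv_equiv track=rewrite | github.com/EBI-G2P/gene2phenotype_api | gene2phenotype_project/gene2phenotype_app/views/panel.py | extract_disease_id
-- ===== SOURCE A (Python) =====
-- def extract_disease_id(disease_ids):
--     disease_mim = ""
--     disease_mondo = ""
--
--     for disease in disease_ids:
--         if disease.startswith("MONDO"):
--             disease_mondo = disease
--         else:
--             disease_mim = disease
--
--     return disease_mim, disease_mondo
-- ===== SOURCE B (Python) =====
-- def extract_disease_id(disease_ids):
--     mim = next((d for d in reversed(disease_ids) if not d.startswith("MONDO")), "")
--     mondo = next((d for d in reversed(disease_ids) if d.startswith("MONDO")), "")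
--     return mim, mondo
-- ===== Notes on version B (the rewrite author's own statement) =====
-- stated objective: alternative
-- what changed: Replaces the single forward loop that overwrites two accumulators with two backward searches (next over reversed) that each stop at the first (i.e. last) matching element.
import Mathlib
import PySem

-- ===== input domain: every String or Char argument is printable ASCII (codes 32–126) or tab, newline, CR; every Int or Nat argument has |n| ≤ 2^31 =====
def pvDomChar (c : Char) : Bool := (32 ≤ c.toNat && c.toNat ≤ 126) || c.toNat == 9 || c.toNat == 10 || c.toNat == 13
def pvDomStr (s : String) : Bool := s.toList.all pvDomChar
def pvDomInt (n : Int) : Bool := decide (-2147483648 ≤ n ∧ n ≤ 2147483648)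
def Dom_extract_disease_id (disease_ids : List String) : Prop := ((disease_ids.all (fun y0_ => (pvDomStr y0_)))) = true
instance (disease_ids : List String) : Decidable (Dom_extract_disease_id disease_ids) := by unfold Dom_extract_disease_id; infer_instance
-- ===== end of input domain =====

-- B changes the decomposition (two backward early-exit searches instead of one overwriting forward loop); same cost.

-- ===== PORT A =====
-- one forward loop, two accumulators, last write wins
def extract_disease_id (disease_ids : List String) : String × String :=
  disease_ids.foldl
    (fun st disease =>
      if PySem.Str.startswith disease "MONDO" then (st.1, disease) else (disease, st.2))
    ("", "")

-- ===== PORT B =====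
-- first match from the right in each category, default ""
def extract_disease_id_alt (disease_ids : List String) : String × String :=
  ((disease_ids.reverse.find? (fun d => !(PySem.Str.startswith d "MONDO"))).getD "",
   (disease_ids.reverse.find? (fun d => PySem.Str.startswith d "MONDO")).getD "")

-- ===== PRECONDITION & SPEC =====
def Spec_extract_disease_id (disease_ids : List String) (out : String × String) : Prop := out = extract_disease_id_alt disease_ids
instance (disease_ids : List String) (out : String × String) : Decidable (Spec_extract_disease_id disease_ids out) := by unfold Spec_extract_disease_id; infer_instance

-- ===== CLAIM (what is proved, stated in full; the proofs are below) =====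
def Claim_equal_extract_disease_id : Prop := ∀ (disease_ids : List String), Dom_extract_disease_id disease_ids → Spec_extract_disease_id disease_ids (extract_disease_id disease_ids)

-- ===== LEMMAS AND PROOFS =====

-- the fold from any start state equals the two right-to-left searches with the start state as default
theorem fold_eq_find (ids : List String) : ∀ (m o : String),
    ids.foldl
      (fun st disease =>
        if PySem.Str.startswith disease "MONDO" then (st.1, disease) else (disease, st.2))
      (m, o)
    = ((ids.reverse.find? (fun d => !(PySem.Str.startswith d "MONDO"))).getD m,
       (ids.reverse.find? (fun d => PySem.Str.startswith d "MONDO")).getD o) := by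
  induction ids with
  | nil => intro m o; simp
  | cons d ids ih =>
    intro m o
    simp only [List.foldl_cons, List.reverse_cons, List.find?_append]
    by_cases h : PySem.Str.startswith d "MONDO"
    · rw [if_pos h, ih]
      have hnm : ([d].find? (fun x => !(PySem.Str.startswith x "MONDO"))) = none := by
        simp only [List.find?]; rw [h]; rfl
      have hmo : ([d].find? (fun x => PySem.Str.startswith x "MONDO")) = some d := by
        simp only [List.find?]; rw [h]
      rw [hnm, hmo]
      simp
    · rw [if_neg h, ih]
      have hb : PySem.Str.startswith d "MONDO" = false := by
        simpa using h
      have hnm : ([d].find? (fun x => !(PySem.Str.startswith x "MONDO"))) = some d := by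
        simp only [List.find?]; rw [hb]; rfl
      have hmo : ([d].find? (fun x => PySem.Str.startswith x "MONDO")) = none := by
        simp only [List.find?]; rw [hb]
      rw [hnm, hmo]
      simp

-- ===== VERDICT (by name: the statement is the Claim_ definition above) =====
theorem extract_disease_id_spec : Claim_equal_extract_disease_id := by
  intro ids _
  unfold Spec_extract_disease_id extract_disease_id extract_disease_id_alt
  exact fold_eq_find ids "" ""
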